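-- pv_equiv track=rewrite | github.com/DilyanDinev/fund_may_2024 | functions_exercise/factorial_division.py | factorial_division
-- ===== SOURCE A (Python) =====
-- def factorial_division(num1, num2):
--     num = 1
--     number = 1
--     for current_num in range(1, num1 + 1):
--         num *= current_num
--     for current_num in range(1, num2 + 1):
--         number *= current_num
--     result = num // number
--     return f"{result:.2f}"
-- ===== SOURCE B (Python) =====
-- def factorial_division(num1, num2):
--     # num1! // num2! telescopes to the product of the integers in (num2, num1];
--     # when num2! is strictly larger, the quotient floors to 0.
--     hi = max(num1, 1)
--     lo = max(num2, 1)
--     if hi < lo: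
--         return "0.00"
--     result = 1
--     for k in range(lo + 1, hi + 1):
--         result *= k
--     return f"{result}.00"
-- ===== Notes on version B (the rewrite author's own statement) =====
-- stated objective: faster
-- what changed: B computes the telescoped product of the integers in (num2, num1] (0 when num2! is strictly larger) instead of two full factorial loops plus integer division, and prints the exact integer with '.00' instead of formatting through float; Pre_ excludes inputs whose quotient is not exactly representable as an IEEE double, where A's ':.2f' prints float-rounded digits or raises OverflowError.
-- outside the precondition, e.g. on factorial_division(25, 0): A returns '15511210043330986055303168.00', B returns '15511210043330985984000000.00'
import Mathlib
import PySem

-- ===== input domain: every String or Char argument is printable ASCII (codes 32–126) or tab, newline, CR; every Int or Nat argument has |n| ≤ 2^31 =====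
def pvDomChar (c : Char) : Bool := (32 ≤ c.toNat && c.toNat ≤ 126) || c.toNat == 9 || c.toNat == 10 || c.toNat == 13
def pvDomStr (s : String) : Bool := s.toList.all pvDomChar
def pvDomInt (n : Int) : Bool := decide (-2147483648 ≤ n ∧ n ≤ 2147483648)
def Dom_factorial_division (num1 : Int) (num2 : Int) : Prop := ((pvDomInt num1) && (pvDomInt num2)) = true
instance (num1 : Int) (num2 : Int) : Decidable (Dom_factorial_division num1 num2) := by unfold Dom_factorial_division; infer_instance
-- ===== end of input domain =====

-- B replaces A's two full factorial loops and integer division by the telescoped product of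
-- the integers in (num2, num1] (0 when num2! is strictly larger), printing the exact integer
-- with ".00" (objective: faster).

-- ===== PORT A =====
-- f"{result:.2f}" is ported as exact decimal digits ++ ".00"; this is exact whenever the
-- (nonnegative integer) result converts to float without rounding — guaranteed by Pre_ below.
def factorial_division (num1 : Int) (num2 : Int) : String :=
  let num := (PySem.List.pyRange 1 (num1 + 1) 1).foldl (· * ·) 1
  let number := (PySem.List.pyRange 1 (num2 + 1) 1).foldl (· * ·) 1
  let result := PySem.Int.floordiv num number
  PySem.Int.toStr result ++ ".00"

-- ===== PORT B =====
def factorial_division_alt (num1 : Int) (num2 : Int) : String :=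
  let hi := max num1 1
  let lo := max num2 1
  if hi < lo then "0.00"
  else
    let result := (PySem.List.pyRange (lo + 1) (hi + 1) 1).foldl (· * ·) 1
    PySem.Int.toStr result ++ ".00"

-- ===== PRECONDITION & SPEC =====
-- the integer quotient A formats (a pure math expression, not either port's loop):
def pvQuot (num1 : Int) (num2 : Int) : Nat :=
  (List.range' (num2.toNat + 1) (num1.toNat - num2.toNat)).prod
-- n is exactly representable as an IEEE-754 double
def pvReprDouble (n : Nat) : Prop :=
  n < 2 ^ 53 ∨ (Nat.log2 n + 1 ≤ 1024 ∧ 2 ^ (Nat.log2 n + 1 - 53) ∣ n)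

-- Pre_ excludes inputs whose quotient is not exactly representable as an IEEE double: there A's
-- ':.2f' prints float-rounded digits (or raises OverflowError past 2^1024), an artefact of
-- formatting through float that an exact re-implementation should not reproduce. (The bound
-- num1 ≤ num2 + 1100 never excludes a representable quotient: a gap over 1100 forces a quotient
-- ≥ 2^1100, far past overflow; it only keeps the condition cheap to decide.)
def Pre_factorial_division (num1 : Int) (num2 : Int) : Prop :=
  num1.toNat ≤ num2.toNat + 1100 ∧ pvReprDouble (pvQuot num1 num2)
instance (num1 : Int) (num2 : Int) : Decidable (Pre_factorial_division num1 num2) := by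
  unfold Pre_factorial_division pvReprDouble; infer_instance

def pvWitness_factorial_division : Int × Int := (5, 2)

def Spec_factorial_division (num1 : Int) (num2 : Int) (out : String) : Prop := out = factorial_division_alt num1 num2
instance (num1 : Int) (num2 : Int) (out : String) : Decidable (Spec_factorial_division num1 num2 out) := by unfold Spec_factorial_division; infer_instance

-- ===== CLAIM (what is proved, stated in full; the proofs are below) =====
def Claim_equal_factorial_division : Prop := ∀ (num1 : Int) (num2 : Int), Dom_factorial_division num1 num2 → Pre_factorial_division num1 num2 → Spec_factorial_division num1 num2 (factorial_division num1 num2)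

-- ===== LEMMAS AND PROOFS =====

-- the product of the d integers m+1, …, m+d times m! is (m+d)!
theorem pv_prod_shift_factorial (d m : Nat) :
    ((List.range d).map (fun j : Nat => ((m : Int) + 1 + (j : Int)))).prod * (Nat.factorial m : Int)
      = (Nat.factorial (m + d) : Int) := by
  induction d with
  | zero => simp
  | succ d ih =>
      rw [List.range_succ, List.map_append, List.prod_append,
        show m + (d + 1) = (m + d) + 1 by omega, Nat.factorial_succ]
      simp only [List.map_cons, List.map_nil, List.prod_cons, List.prod_nil, mul_one]
      push_cast at ih ⊢
      linear_combination ((m : ℤ) + 1 + (d : ℤ)) * ih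

theorem pv_foldl_pyRange_prod (a : Int) (b : Int) :
    (PySem.List.pyRange a b 1).foldl (· * ·) 1
      = ((List.range (b - a).toNat).map (fun j : Nat => a + (j : Int))).prod := by
  rw [PySem.List.pyRange_one]
  exact List.prod_eq_foldl.symm

-- A's factorial loop computes (n.toNat)!
theorem pv_loop_factorial (n : Int) :
    (PySem.List.pyRange 1 (n + 1) 1).foldl (· * ·) 1 = (Nat.factorial n.toNat : Int) := by
  rw [pv_foldl_pyRange_prod, show (n + 1 - 1 : Int).toNat = n.toNat by omega]
  simpa using pv_prod_shift_factorial n.toNat 0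

-- clamping to max(n,1) does not change the factorial of n.toNat
theorem pv_fact_clamp (n : Int) :
    Nat.factorial n.toNat = Nat.factorial (max n 1).toNat := by
  by_cases h : 1 ≤ n
  · rw [max_eq_left h]
  · rw [max_eq_right (by omega), show n.toNat = 0 by omega]
    decide

-- the two ports agree on every input (the ports print exact digits; Pre_ is what makes
-- A's port faithful to Python's float formatting)
theorem pv_result_eq (num1 num2 : Int) :
    factorial_division num1 num2 = factorial_division_alt num1 num2 := by
  simp only [factorial_division, factorial_division_alt, pv_loop_factorial]
  set hi := max num1 1 with hhi
  set lo := max num2 1 with hlo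
  have h1 : (1 : Int) ≤ hi := le_max_right _ _
  have h2 : (1 : Int) ≤ lo := le_max_right _ _
  rw [pv_fact_clamp num1, pv_fact_clamp num2, ← hhi, ← hlo]
  by_cases hcmp : hi < lo
  · -- hi < lo: the strictly larger factorial makes the floor quotient 0
    rw [if_pos hcmp]
    have hlt : Nat.factorial hi.toNat < Nat.factorial lo.toNat :=
      (Nat.factorial_lt (by omega)).mpr (by omega)
    rw [PySem.Int.floordiv_natCast, Nat.div_eq_of_lt hlt]
    decide
  · rw [if_neg hcmp]
    rw [pv_foldl_pyRange_prod,
      show (hi + 1 - (lo + 1) : Int).toNat = (hi - lo).toNat by omega]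
    refine congrArg (fun r => PySem.Int.toStr r ++ ".00") ?_
    have hm2 : ((lo.toNat : Nat) : Int) = lo := Int.toNat_of_nonneg (by omega)
    have hmap : (List.range (hi - lo).toNat).map (fun j : Nat => lo + 1 + (j : Int))
        = (List.range (hi - lo).toNat).map (fun j : Nat => ((lo.toNat : Int) + 1 + (j : Int))) := by
      apply List.map_congr_left
      intro j _
      rw [hm2]
    have hkey := pv_prod_shift_factorial (hi - lo).toNat lo.toNat
    rw [show lo.toNat + (hi - lo).toNat = hi.toNat by omega] at hkey
    have hdvd : Nat.factorial lo.toNat ∣ Nat.factorial hi.toNat :=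
      Nat.factorial_dvd_factorial (by omega)
    rw [PySem.Int.floordiv_natCast]
    have hpos : ((Nat.factorial lo.toNat : Nat) : Int) ≠ 0 := by
      exact_mod_cast Nat.factorial_ne_zero lo.toNat
    apply mul_right_cancel₀ hpos
    rw [hmap, hkey]
    exact_mod_cast congrArg (fun x : Nat => (x : Int)) (Nat.div_mul_cancel hdvd)

-- ===== VERDICT (by name: the statement is the Claim_ definition above) =====
theorem factorial_division_spec : Claim_equal_factorial_division := by
  intro num1 num2 _ _
  unfold Spec_factorial_division
  exact pv_result_eq num1 num2
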